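-- pv_equiv track=rewrite | github.com/qobilidop/p4py | src/p4py/sim/simulator.py | _compute_csum16
-- ===== SOURCE A (Python) =====
-- def _compute_csum16(field_values: list[tuple[int, int]]) -> int:
--     """Compute 16-bit ones' complement checksum (RFC 1071).
--
--     Args:
--         field_values: List of (value, width_in_bits) pairs.
--     """
--     # Concatenate all fields into a single bit string, then sum 16-bit words.
--     total_bits = 0
--     combined = 0
--     for value, width in field_values:
--         combined = (combined << width) | (value & ((1 << width) - 1))
--         total_bits += width
--
--     # Pad to 16-bit boundary.
--     if total_bits % 16:
--         pad = 16 - (total_bits % 16)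
--         combined <<= pad
--         total_bits += pad
--
--     # Sum 16-bit words.
--     total = 0
--     num_words = total_bits // 16
--     for i in range(num_words):
--         shift = (num_words - 1 - i) * 16
--         word = (combined >> shift) & 0xFFFF
--         total += word
--
--     # Fold carry bits.
--     while total >> 16:
--         total = (total & 0xFFFF) + (total >> 16)
--
--     return (~total) & 0xFFFF
-- ===== SOURCE B (Python) =====
-- def _compute_csum16(field_values):
--     """Compute 16-bit ones' complement checksum (RFC 1071).
--
--     Streams the fields through a small bit buffer, extracting 16-bit words
--     as soon as they are complete, so no big concatenated integer is built;
--     the carry folding is done in closed form modulo 0xFFFF.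
--     """
--     total = 0
--     buf = 0     # buffered bits (always < 2**nbits)
--     nbits = 0   # number of buffered bits, kept below 16 between fields
--     for value, width in field_values:
--         buf = (buf << width) | (value & ((1 << width) - 1))
--         nbits += width
--         while nbits >= 16:
--             nbits -= 16
--             total += buf >> nbits
--             buf &= (1 << nbits) - 1
--     if nbits:
--         total += buf << (16 - nbits)  # pad the tail to a 16-bit boundary
--     # Fold carries: ones' complement sum is arithmetic modulo 0xFFFF.
--     fold = 0 if total == 0 else (total - 1) % 0xFFFF + 1
--     return 0xFFFF - fold
-- ===== Notes on version B (the rewrite author's own statement) =====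
-- stated objective: faster
-- what changed: B streams the fields through a small bit buffer, adding each completed 16-bit word to a running sum instead of first concatenating everything into one huge integer and re-shifting it per word, and replaces the carry-folding loop by the closed form modulo 0xFFFF.
import Mathlib
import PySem

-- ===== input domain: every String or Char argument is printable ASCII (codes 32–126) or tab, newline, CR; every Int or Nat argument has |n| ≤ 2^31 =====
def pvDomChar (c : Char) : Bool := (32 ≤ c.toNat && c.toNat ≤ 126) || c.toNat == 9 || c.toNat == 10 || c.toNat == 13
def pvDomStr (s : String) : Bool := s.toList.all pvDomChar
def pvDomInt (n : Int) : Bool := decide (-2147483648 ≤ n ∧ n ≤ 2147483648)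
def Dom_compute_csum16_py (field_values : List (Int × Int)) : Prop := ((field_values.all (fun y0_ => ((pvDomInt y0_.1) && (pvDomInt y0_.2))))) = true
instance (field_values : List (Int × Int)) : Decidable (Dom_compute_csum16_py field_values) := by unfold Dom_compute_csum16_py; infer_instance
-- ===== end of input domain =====

-- B streams the fields through a small bit buffer, summing completed 16-bit words on the fly,
-- and folds the carries in closed form mod 0xFFFF, instead of A's big concatenated integer
-- that is re-shifted once per word (objective: faster, measured).

-- ===== PORT A =====
-- Bitwise steps of the Python are ported arithmetically, each exactly:
-- for width ≥ 0 (Pre_), 'value & ((1 << width) - 1)' is 'value % 2**width' (Python-exact,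
-- negatives included); on the nonnegative ints they are applied to, 'x << k' is 'x * 2**k',
-- 'x >> k' is 'x // 2**k', 'x & 0xFFFF' is 'x % 65536', and the truthiness test
-- 'while total >> 16:' is '65536 ≤ total'; '~total' is '-total - 1' (always exact).
def pvFoldCarryA (total : Int) : Int :=
  -- while total >> 16: total = (total & 0xFFFF) + (total >> 16)
  if _h : 65536 ≤ total then
    pvFoldCarryA (PySem.Int.mod total 65536 + PySem.Int.floordiv total 65536)
  else total
termination_by total.toNat
decreasing_by
  rw [PySem.Int.mod_eq_emod_of_pos (by norm_num : (0:Int) < 65536),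
      PySem.Int.floordiv_eq_ediv_of_pos (by norm_num : (0:Int) < 65536)]
  omega

def compute_csum16_py (field_values : List (Int × Int)) : Int :=
  -- for value, width in field_values: combined = (combined << width) | (value & ((1 << width) - 1)); total_bits += width
  let st := field_values.foldl
    (fun (s : Int × Int) fv =>
      (s.1 * 2 ^ fv.2.toNat + PySem.Int.mod fv.1 (2 ^ fv.2.toNat), s.2 + fv.2))
    ((0 : Int), (0 : Int))
  -- if total_bits % 16: pad = 16 - total_bits % 16; combined <<= pad; total_bits += pad
  let pad : Int := if PySem.Int.mod st.2 16 ≠ 0 then 16 - PySem.Int.mod st.2 16 else 0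
  let combined := st.1 * 2 ^ pad.toNat
  let total_bits := st.2 + pad
  let num_words := PySem.Int.floordiv total_bits 16
  -- for i in range(num_words): total += (combined >> (num_words - 1 - i) * 16) & 0xFFFF
  let total := (PySem.List.pyRange 0 num_words 1).foldl
    (fun t i =>
      t + PySem.Int.mod (PySem.Int.floordiv combined (2 ^ ((num_words - 1 - i) * 16).toNat)) 65536)
    0
  -- return (~total) & 0xFFFF
  PySem.Int.mod (-(pvFoldCarryA total) - 1) 65536

-- ===== PORT B =====
-- same arithmetic porting of the bit operations as in port A (buf and total stay nonnegative)
def pvDrainB (total buf nbits : Int) : Int × Int × Int :=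
  -- while nbits >= 16: nbits -= 16; total += buf >> nbits; buf &= (1 << nbits) - 1
  if _h : 16 ≤ nbits then
    pvDrainB (total + PySem.Int.floordiv buf (2 ^ (nbits - 16).toNat))
      (PySem.Int.mod buf (2 ^ (nbits - 16).toNat)) (nbits - 16)
  else (total, buf, nbits)
termination_by nbits.toNat
decreasing_by omega

def compute_csum16_py_alt (field_values : List (Int × Int)) : Int :=
  -- for value, width: buf = (buf << width) | (value & ((1 << width) - 1)); nbits += width; <drain>
  let st := field_values.foldl
    (fun (s : Int × Int × Int) fv =>
      pvDrainB s.1 (s.2.1 * 2 ^ fv.2.toNat + PySem.Int.mod fv.1 (2 ^ fv.2.toNat)) (s.2.2 + fv.2))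
    ((0 : Int), (0 : Int), (0 : Int))
  -- if nbits: total += buf << (16 - nbits)
  let total := if st.2.2 ≠ 0 then st.1 + st.2.1 * 2 ^ (16 - st.2.2).toNat else st.1
  -- fold = 0 if total == 0 else (total - 1) % 0xFFFF + 1
  let fold := if total = 0 then 0 else PySem.Int.mod (total - 1) 65535 + 1
  65535 - fold

-- ===== PRECONDITION & SPEC =====
-- Pre_ excludes exactly the inputs with a negative field width, on which the Python A
-- raises ValueError ('negative shift count') in its first loop.
def Pre_compute_csum16_py (field_values : List (Int × Int)) : Prop :=
  ∀ p ∈ field_values, 0 ≤ p.2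
instance (field_values : List (Int × Int)) : Decidable (Pre_compute_csum16_py field_values) := by
  unfold Pre_compute_csum16_py; infer_instance

def pvWitness_compute_csum16_py : (List (Int × Int)) := [(-5, 3), (1000, 16), (7, 5)]

def Spec_compute_csum16_py (field_values : List (Int × Int)) (out : Int) : Prop := out = compute_csum16_py_alt field_values
instance (field_values : List (Int × Int)) (out : Int) : Decidable (Spec_compute_csum16_py field_values out) := by unfold Spec_compute_csum16_py; infer_instance

-- ===== CLAIM (what is proved, stated in full; the proofs are below) =====
def Claim_equal_compute_csum16_py : Prop := ∀ (field_values : List (Int × Int)), Dom_compute_csum16_py field_values → Pre_compute_csum16_py field_values → Spec_compute_csum16_py field_values (compute_csum16_py field_values)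

-- ===== LEMMAS AND PROOFS =====

-- Nat-level model of the concatenation loop shared by both ports
def pvStepN (s : Nat × Nat) (fv : Int × Int) : Nat × Nat :=
  (s.1 * 2 ^ fv.2.toNat + (PySem.Int.mod fv.1 ((2 : Int) ^ fv.2.toNat)).toNat, s.2 + fv.2.toNat)

-- digit sum in base 2^16
def pvSumW (x : Nat) : Nat :=
  if h : x = 0 then 0 else x % 65536 + pvSumW (x / 65536)
termination_by x
decreasing_by omega

-- Nat version of the carry fold
def pvFoldN (t : Nat) : Nat :=
  if h : 65536 ≤ t then pvFoldN (t % 65536 + t / 65536) else t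
termination_by t
decreasing_by omega

lemma pvSumW_zero : pvSumW 0 = 0 := by unfold pvSumW; simp

lemma pvSumW_div_add (x : Nat) : pvSumW x = x % 65536 + pvSumW (x / 65536) := by
  by_cases h : x = 0
  · subst h; simp [pvSumW_zero]
  · rw [pvSumW]; simp [h]

lemma pvSumW_hi_lo (q r : Nat) (hr : r < 65536) : pvSumW (q * 65536 + r) = r + pvSumW q := by
  rw [pvSumW_div_add (q * 65536 + r)]
  have h1 : (q * 65536 + r) % 65536 = r := by omega
  have h2 : (q * 65536 + r) / 65536 = q := by omega
  rw [h1, h2]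

lemma pvFoldN_closed (t : Nat) : pvFoldN t = if t = 0 then 0 else (t - 1) % 65535 + 1 := by
  induction t using Nat.strong_induction_on with
  | _ t ih =>
    rw [pvFoldN]
    by_cases h : 65536 ≤ t
    · simp only [h, dif_pos]
      rw [ih (t % 65536 + t / 65536) (by omega)]
      have ht' : t % 65536 + t / 65536 ≠ 0 := by omega
      have ht0 : t ≠ 0 := by omega
      simp only [ht', ht0, if_false]
      have hcong : (t % 65536 + t / 65536 - 1) % 65535 = (t - 1) % 65535 := by
        have := Nat.div_add_mod t 65536
        have h2 : t - 1 = (t % 65536 + t / 65536 - 1) + 65535 * (t / 65536) := by omega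
        omega
      omega
    · simp only [h, dif_neg, not_false_iff]
      by_cases h0 : t = 0
      · simp [h0]
      · simp only [h0, if_false]
        have : (t - 1) % 65535 = if t - 1 < 65535 then t - 1 else t - 1 - 65535 := by
          rcases Nat.lt_or_ge (t-1) 65535 with hlt | hge
          · simp [hlt, Nat.mod_eq_of_lt hlt]
          · have : t - 1 - 65535 < 65535 := by omega
            rw [if_neg (by omega)]
            omega
        omega

-- the Int → Nat bridge for A's carry-fold loop
lemma pvFoldCarryA_bridge (t : Nat) : pvFoldCarryA (t : Int) = (pvFoldN t : Int) := by
  induction t using Nat.strong_induction_on with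
  | _ t ih =>
    rw [pvFoldCarryA, pvFoldN]
    by_cases h : 65536 ≤ t
    · have hI : (65536 : Int) ≤ (t : Nat) := by exact_mod_cast h
      simp only [hI, dif_pos, h]
      have e1 : PySem.Int.mod (t : Nat) 65536 = ((t % 65536 : Nat) : Int) := by
        exact_mod_cast PySem.Int.mod_natCast t 65536
      have e2 : PySem.Int.floordiv (t : Nat) 65536 = ((t / 65536 : Nat) : Int) := by
        exact_mod_cast PySem.Int.floordiv_natCast t 65536
      rw [e1, e2]
      rw [show ((t % 65536 : Nat) : Int) + ((t / 65536 : Nat) : Int) = ((t % 65536 + t / 65536 : Nat) : Int) by push_cast; ring]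
      exact ih _ (by omega)
    · have hI : ¬ (65536 : Int) ≤ (t : Nat) := by exact_mod_cast h
      simp [hI, h]

-- bridge for the concatenation loop (used by both ports)
lemma pvLoop1_bridge (fvs : List (Int × Int)) (h : ∀ p ∈ fvs, 0 ≤ p.2) (c t : Nat) :
    fvs.foldl (fun (s : Int × Int) fv =>
        (s.1 * 2 ^ fv.2.toNat + PySem.Int.mod fv.1 (2 ^ fv.2.toNat), s.2 + fv.2))
      ((c : Int), (t : Int))
    = (((fvs.foldl pvStepN (c, t)).1 : Int), ((fvs.foldl pvStepN (c, t)).2 : Int)) := by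
  induction fvs generalizing c t with
  | nil => simp
  | cons fv rest ih =>
    have hw : 0 ≤ fv.2 := h fv (List.mem_cons_self)
    have hrest : ∀ p ∈ rest, 0 ≤ p.2 := fun p hp => h p (List.mem_cons_of_mem _ hp)
    simp only [List.foldl_cons]
    have hm0 : 0 ≤ PySem.Int.mod fv.1 ((2:Int) ^ fv.2.toNat) :=
      PySem.Int.mod_nonneg _ (by positivity)
    have hme : PySem.Int.mod fv.1 ((2:Int) ^ fv.2.toNat)
        = ((PySem.Int.mod fv.1 ((2:Int) ^ fv.2.toNat)).toNat : Int) := (Int.toNat_of_nonneg hm0).symm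
    have e1 : (c : Int) * 2 ^ fv.2.toNat + PySem.Int.mod fv.1 (2 ^ fv.2.toNat)
        = ((c * 2 ^ fv.2.toNat + (PySem.Int.mod fv.1 ((2:Int) ^ fv.2.toNat)).toNat : Nat) : Int) := by
      conv_lhs => rw [hme]
      push_cast; ring
    have e2 : (t : Int) + fv.2 = ((t + fv.2.toNat : Nat) : Int) := by
      conv_lhs => rw [show fv.2 = (fv.2.toNat : Int) from (Int.toNat_of_nonneg hw).symm]
      push_cast; ring
    rw [e1, e2, ih hrest]
    rfl

lemma pvModel_lt (fvs : List (Int × Int)) (c t : Nat) (hc : c < 2 ^ t) :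
    (fvs.foldl pvStepN (c, t)).1 < 2 ^ (fvs.foldl pvStepN (c, t)).2 := by
  induction fvs generalizing c t with
  | nil => simpa using hc
  | cons fv rest ih =>
    simp only [List.foldl_cons]
    apply ih
    have hmlt : (PySem.Int.mod fv.1 ((2:Int) ^ fv.2.toNat)).toNat < 2 ^ fv.2.toNat := by
      have h1 := PySem.Int.mod_lt fv.1 (b := (2:Int) ^ fv.2.toNat) (by positivity)
      rw [Int.toNat_lt (PySem.Int.mod_nonneg _ (by positivity))]
      exact_mod_cast h1
    have hub : c * 2 ^ fv.2.toNat + 2 ^ fv.2.toNat ≤ 2 ^ (t + fv.2.toNat) := by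
      rw [pow_add]
      calc c * 2 ^ fv.2.toNat + 2 ^ fv.2.toNat = (c + 1) * 2 ^ fv.2.toNat := by ring
        _ ≤ 2 ^ t * 2 ^ fv.2.toNat := by
            exact Nat.mul_le_mul_right _ (by omega)
    exact lt_of_lt_of_le (Nat.add_lt_add_left hmlt _) hub

-- pure-Nat core of A's word-summing loop
lemma pvWordSum (n : Nat) : ∀ C : Nat, C < 2 ^ (16 * n) →
    ((List.range n).map (fun k => C / 2 ^ (16 * (n - 1 - k)) % 65536)).sum = pvSumW C := by
  induction n with
  | zero =>
    intro C hC
    interval_cases C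
    simp [pvSumW_zero]
  | succ n ih =>
    intro C hC
    rw [List.range_succ, List.map_append, List.sum_append]
    have hlast : ((List.map (fun k => C / 2 ^ (16 * (n + 1 - 1 - k)) % 65536) [n]).sum) = C % 65536 := by
      simp
    rw [hlast]
    have hre : List.map (fun k => C / 2 ^ (16 * (n + 1 - 1 - k)) % 65536) (List.range n)
        = List.map (fun k => (C / 65536) / 2 ^ (16 * (n - 1 - k)) % 65536) (List.range n) := by
      apply List.map_congr_left
      intro k hk
      have hklt : k < n := List.mem_range.mp hk
      have he : 16 * (n + 1 - 1 - k) = 16 * (n - 1 - k) + 16 := by omega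
      rw [he, pow_add, Nat.div_div_eq_div_mul]
      norm_num [Nat.mul_comm]
    rw [hre, ih (C / 65536) (by
      have : 2 ^ (16 * (n + 1)) = 2 ^ (16 * n) * 65536 := by rw [show 16 * (n+1) = 16*n + 16 by ring, pow_add]; norm_num
      omega)]
    rw [pvSumW_div_add C]
    omega

-- A's word-summing loop computes the digit sum
lemma pvWordLoop (n C : Nat) (hC : C < 2 ^ (16 * n)) :
    (PySem.List.pyRange 0 (n : Int) 1).foldl
      (fun t i =>
        t + PySem.Int.mod (PySem.Int.floordiv (C : Int) (2 ^ (((n : Int) - 1 - i) * 16).toNat)) 65536)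
      0 = (pvSumW C : Int) := by
  rw [PySem.List.pyRange_zero_natCast, List.foldl_map, PySem.List.foldl_add]
  have hbody : ∀ k ∈ List.range n,
      (fun k : Nat => PySem.Int.mod
          (PySem.Int.floordiv (C : Int) (2 ^ (((n:Int) - 1 - (k:Int)) * 16).toNat)) 65536) k
        = (fun k : Nat => ((C / 2 ^ (16 * (n - 1 - k)) % 65536 : Nat) : Int)) k := by
    intro k hk
    have hklt : k < n := List.mem_range.mp hk
    have hexp : ((((n:Int) - 1 - (k:Int)) * 16)).toNat = 16 * (n - 1 - k) := by omega
    dsimp only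
    rw [hexp]
    rw [show ((2:Int) ^ (16 * (n - 1 - k))) = ((2 ^ (16 * (n - 1 - k)) : Nat) : Int) by push_cast; ring]
    rw [PySem.Int.floordiv_natCast]
    exact_mod_cast PySem.Int.mod_natCast (C / 2 ^ (16 * (n - 1 - k))) 65536
  rw [List.map_congr_left hbody, ← pvWordSum n C hC, Nat.cast_list_sum, List.map_map]
  simp only [zero_add, Function.comp_def]

-- B's drain loop, stated against the model
lemma pvDrainB_spec (j : Nat) (C : Nat) :
    pvDrainB ((pvSumW (C / 2 ^ j) : Nat) : Int) ((C % 2 ^ j : Nat) : Int) (j : Int)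
    = (((pvSumW (C / 2 ^ (j % 16)) : Nat) : Int), ((C % 2 ^ (j % 16) : Nat) : Int), ((j % 16 : Nat) : Int)) := by
  induction j using Nat.strong_induction_on with
  | _ j ih =>
    rw [pvDrainB]
    by_cases h : 16 ≤ j
    · have hI : (16 : Int) ≤ (j : Nat) := by exact_mod_cast h
      simp only [hI, dif_pos]
      have ht : ((j : Int) - 16).toNat = j - 16 := by omega
      rw [ht]
      rw [show ((2:Int) ^ (j - 16)) = ((2 ^ (j - 16) : Nat) : Int) by push_cast; ring]
      rw [PySem.Int.floordiv_natCast, PySem.Int.mod_natCast]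
      have hdiv : C % 2 ^ j / 2 ^ (j - 16) = C / 2 ^ (j - 16) % 65536 := by
        rw [show (2:Nat) ^ j = 2 ^ (j - 16) * 65536 by
          rw [show (65536 : Nat) = 2 ^ 16 by norm_num, ← pow_add]
          congr 1; omega]
        exact Nat.mod_mul_right_div_self C _ _
      have hmod : C % 2 ^ j % 2 ^ (j - 16) = C % 2 ^ (j - 16) :=
        Nat.mod_mod_of_dvd C (pow_dvd_pow 2 (by omega))
      have hsum : pvSumW (C / 2 ^ j) + C / 2 ^ (j - 16) % 65536 = pvSumW (C / 2 ^ (j - 16)) := by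
        rw [pvSumW_div_add (C / 2 ^ (j - 16))]
        have : C / 2 ^ (j - 16) / 65536 = C / 2 ^ j := by
          rw [Nat.div_div_eq_div_mul, show (2:Nat) ^ (j - 16) * 65536 = 2 ^ j by
            rw [show (65536 : Nat) = 2 ^ 16 by norm_num, ← pow_add]
            congr 1; omega]
        rw [this]; omega
      rw [hdiv, hmod]
      rw [show ((pvSumW (C / 2 ^ j) : Nat) : Int) + ((C / 2 ^ (j - 16) % 65536 : Nat) : Int)
            = ((pvSumW (C / 2 ^ (j - 16)) : Nat) : Int) by exact_mod_cast congrArg (Nat.cast (R := Int)) hsum]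
      rw [show ((j : Int) - 16) = ((j - 16 : Nat) : Int) by omega]
      rw [ih (j - 16) (by omega)]
      have hjm : (j - 16) % 16 = j % 16 := by omega
      rw [hjm]
    · have hI : ¬ (16 : Int) ≤ (j : Nat) := by exact_mod_cast h
      simp only [hI, dif_neg, not_false_iff]
      rw [Nat.mod_eq_of_lt (by omega : j < 16)]

-- B's streaming loop, stated against the model
lemma pvStream_bridge (fvs : List (Int × Int)) (h : ∀ p ∈ fvs, 0 ≤ p.2) (C T : Nat) :
    fvs.foldl (fun (s : Int × Int × Int) fv =>
        pvDrainB s.1 (s.2.1 * 2 ^ fv.2.toNat + PySem.Int.mod fv.1 (2 ^ fv.2.toNat)) (s.2.2 + fv.2))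
      (((pvSumW (C / 2 ^ (T % 16)) : Nat) : Int), ((C % 2 ^ (T % 16) : Nat) : Int), ((T % 16 : Nat) : Int))
    = (((pvSumW ((fvs.foldl pvStepN (C, T)).1 / 2 ^ ((fvs.foldl pvStepN (C, T)).2 % 16)) : Nat) : Int),
       (((fvs.foldl pvStepN (C, T)).1 % 2 ^ ((fvs.foldl pvStepN (C, T)).2 % 16) : Nat) : Int),
       (((fvs.foldl pvStepN (C, T)).2 % 16 : Nat) : Int)) := by
  induction fvs generalizing C T with
  | nil => simp
  | cons fv rest ih =>
    have hw : 0 ≤ fv.2 := h fv List.mem_cons_self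
    have hrest : ∀ p ∈ rest, 0 ≤ p.2 := fun p hp => h p (List.mem_cons_of_mem _ hp)
    simp only [List.foldl_cons]
    set k := T % 16 with hk
    set wn := fv.2.toNat with hwn
    have hm0 : 0 ≤ PySem.Int.mod fv.1 ((2:Int) ^ wn) := PySem.Int.mod_nonneg _ (by positivity)
    have hmlt : (PySem.Int.mod fv.1 ((2:Int) ^ wn)).toNat < 2 ^ wn := by
      rw [Int.toNat_lt hm0]
      exact_mod_cast PySem.Int.mod_lt fv.1 (by positivity)
    set m := (PySem.Int.mod fv.1 ((2:Int) ^ wn)).toNat with hmdef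
    set C' := C * 2 ^ wn + m with hC'
    have hrlt : C % 2 ^ k * 2 ^ wn + m < 2 ^ (k + wn) := by
      have h1 : C % 2 ^ k < 2 ^ k := Nat.mod_lt _ (by positivity)
      have h2 : (C % 2 ^ k) * 2 ^ wn + 2 ^ wn ≤ 2 ^ (k + wn) := by
        rw [pow_add]
        calc (C % 2 ^ k) * 2 ^ wn + 2 ^ wn = (C % 2 ^ k + 1) * 2 ^ wn := by ring
          _ ≤ 2 ^ k * 2 ^ wn := Nat.mul_le_mul_right _ (by omega)
      exact lt_of_lt_of_le (Nat.add_lt_add_left hmlt _) h2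
    have hCsplit : C = 2 ^ k * (C / 2 ^ k) + C % 2 ^ k := (Nat.div_add_mod C (2 ^ k)).symm
    have hC'eq : C' = C % 2 ^ k * 2 ^ wn + m + 2 ^ (k + wn) * (C / 2 ^ k) := by
      rw [hC', pow_add]
      conv_lhs => rw [hCsplit]
      ring
    have hmodC' : C' % 2 ^ (k + wn) = C % 2 ^ k * 2 ^ wn + m := by
      rw [hC'eq, Nat.add_mul_mod_self_left]
      exact Nat.mod_eq_of_lt hrlt
    have hdivC' : C' / 2 ^ (k + wn) = C / 2 ^ k := by
      rw [hC'eq, Nat.add_mul_div_left _ _ (by positivity : 0 < 2 ^ (k + wn))]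
      rw [Nat.div_eq_of_lt hrlt]
      omega
    have e1 : ((C % 2 ^ k : Nat) : Int) * 2 ^ wn + PySem.Int.mod fv.1 ((2:Int) ^ wn)
        = ((C' % 2 ^ (k + wn) : Nat) : Int) := by
      rw [hmodC']
      conv_lhs => rw [show PySem.Int.mod fv.1 ((2:Int) ^ wn) = (m : Int) from (Int.toNat_of_nonneg hm0).symm]
      push_cast; ring
    have e2 : ((k : Nat) : Int) + fv.2 = ((k + wn : Nat) : Int) := by
      conv_lhs => rw [show fv.2 = (wn : Int) from (Int.toNat_of_nonneg hw).symm]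
      push_cast; ring
    have e3 : pvSumW (C / 2 ^ k) = pvSumW (C' / 2 ^ (k + wn)) := by rw [hdivC']
    rw [e1, e2, e3, pvDrainB_spec (k + wn) C']
    have hmod16 : (k + wn) % 16 = (T + wn) % 16 := by omega
    rw [hmod16]
    have hstep : pvStepN (C, T) fv = (C', T + wn) := rfl
    rw [hstep]
    exact ih hrest C' (T + wn)

lemma pvFoldN_le (t : Nat) : pvFoldN t ≤ 65535 := by
  rw [pvFoldN_closed]
  by_cases h : t = 0
  · simp [h]
  · simp only [h, if_false]
    have := Nat.mod_lt (t - 1) (y := 65535) (by norm_num)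
    omega

lemma pvSumW_pad (C k : Nat) (hk : 0 < k) (hk16 : k < 16) :
    pvSumW (C * 2 ^ (16 - k)) = C % 2 ^ k * 2 ^ (16 - k) + pvSumW (C / 2 ^ k) := by
  have hsplit : C * 2 ^ (16 - k) = C / 2 ^ k * 65536 + C % 2 ^ k * 2 ^ (16 - k) := by
    conv_lhs => rw [show C = 2 ^ k * (C / 2 ^ k) + C % 2 ^ k from (Nat.div_add_mod C (2 ^ k)).symm]
    rw [show (65536 : Nat) = 2 ^ k * 2 ^ (16 - k) by
      rw [← pow_add, show k + (16 - k) = 16 by omega]; norm_num]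
    ring
  have hlow : C % 2 ^ k * 2 ^ (16 - k) < 65536 := by
    have h1 : C % 2 ^ k < 2 ^ k := Nat.mod_lt _ (by positivity)
    calc C % 2 ^ k * 2 ^ (16 - k) < 2 ^ k * 2 ^ (16 - k) :=
          (Nat.mul_lt_mul_right (by positivity)).mpr h1
      _ = 65536 := by rw [← pow_add, show k + (16 - k) = 16 by omega]; norm_num
  rw [hsplit, pvSumW_hi_lo _ _ hlow]

-- ===== VERDICT (by name: the statement is the Claim_ definition above) =====
theorem compute_csum16_py_spec : Claim_equal_compute_csum16_py := by
  intro fvs _hdom hpre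
  unfold Spec_compute_csum16_py
  have hpre' : ∀ p ∈ fvs, 0 ≤ p.2 := hpre
  set P := fvs.foldl pvStepN (0, 0) with hP
  set C := P.1
  set T := P.2
  have hCT : C < 2 ^ T := pvModel_lt fvs 0 0 (by norm_num)
  set k := T % 16 with hkdef
  have hk16 : k < 16 := Nat.mod_lt _ (by norm_num)
  set padN := (if k = 0 then 0 else 16 - k) with hpadN
  set C2 := C * 2 ^ padN with hC2
  have hdvd : 16 ∣ T + padN := by
    rcases Nat.eq_zero_or_pos k with h0 | h0
    · rw [hpadN, if_pos h0]; omega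
    · rw [hpadN, if_neg (by omega)]; omega
  set n := (T + padN) / 16 with hn
  have h16n : 16 * n = T + padN := by
    rw [hn]; exact Nat.mul_div_cancel' hdvd
  have hC2lt : C2 < 2 ^ (16 * n) := by
    rw [h16n, pow_add, hC2]
    exact (Nat.mul_lt_mul_right (by positivity : 0 < 2 ^ padN)).mpr hCT
  set S2 := pvSumW C2 with hS2
  set F := pvFoldN S2 with hF
  have hFle : F ≤ 65535 := pvFoldN_le S2
  -- ===== value of port A =====
  have hA1 := pvLoop1_bridge fvs hpre' 0 0
  simp only [Nat.cast_zero] at hA1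
  have hAval : compute_csum16_py fvs = 65535 - (F : Int) := by
    unfold compute_csum16_py
    simp only [hA1, ← hP]
    have hmodT : PySem.Int.mod (T : Int) 16 = ((k : Nat) : Int) := by
      exact_mod_cast PySem.Int.mod_natCast T 16
    rw [hmodT]
    have hpadI : (if ((k : Nat) : Int) ≠ 0 then 16 - ((k : Nat) : Int) else 0) = ((padN : Nat) : Int) := by
      rcases Nat.eq_zero_or_pos k with h0 | h0
      · simp [h0, hpadN]
      · rw [if_pos (by exact_mod_cast Nat.pos_iff_ne_zero.mp h0), hpadN, if_neg (by omega)]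
        omega
    rw [hpadI]
    have hpadtoNat : ((padN : Nat) : Int).toNat = padN := Int.toNat_natCast padN
    rw [hpadtoNat]
    have hcomb : ((C : Nat) : Int) * 2 ^ padN = ((C2 : Nat) : Int) := by
      rw [hC2]; push_cast; ring
    rw [hcomb]
    have htb : ((T : Nat) : Int) + ((padN : Nat) : Int) = ((T + padN : Nat) : Int) := by push_cast; ring
    rw [htb]
    have hnw : PySem.Int.floordiv ((T + padN : Nat) : Int) 16 = ((n : Nat) : Int) := by
      rw [hn]; exact_mod_cast PySem.Int.floordiv_natCast (T + padN) 16
    rw [hnw]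
    rw [pvWordLoop n C2 hC2lt]
    rw [pvFoldCarryA_bridge S2, ← hF]
    rw [PySem.Int.mod_eq_emod_of_pos (by norm_num : (0:Int) < 65536)]
    omega
  -- ===== value of port B =====
  have hB1 := pvStream_bridge fvs hpre' 0 0
  simp only [Nat.zero_mod, pow_zero, Nat.zero_div, pvSumW_zero, Nat.cast_zero] at hB1
  have hBval : compute_csum16_py_alt fvs = 65535 - (F : Int) := by
    unfold compute_csum16_py_alt
    simp only [hB1, ← hP]
    have htot : (if (((T % 16 : Nat) : Int)) ≠ 0 then
          ((pvSumW (C / 2 ^ (T % 16)) : Nat) : Int)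
            + ((C % 2 ^ (T % 16) : Nat) : Int) * 2 ^ (16 - (((T % 16 : Nat) : Int))).toNat
        else ((pvSumW (C / 2 ^ (T % 16)) : Nat) : Int)) = ((S2 : Nat) : Int) := by
      rcases Nat.eq_zero_or_pos k with h0 | h0
      · rw [if_neg (by rw [← hkdef, h0]; simp)]
        rw [hS2, hC2, hpadN, ← hkdef, if_pos h0, h0]
        norm_num
      · rw [if_pos (by rw [← hkdef]; exact_mod_cast Nat.pos_iff_ne_zero.mp h0)]
        rw [← hkdef]
        have h1 : ((16 : Int) - ((k : Nat) : Int)).toNat = 16 - k := by omega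
        rw [h1, hS2, hC2, hpadN, if_neg (by omega)]
        rw [pvSumW_pad C k h0 hk16]
        push_cast
        ring
    rw [htot]
    have hfold : (if ((S2 : Nat) : Int) = 0 then 0
          else PySem.Int.mod (((S2 : Nat) : Int) - 1) 65535 + 1) = ((F : Nat) : Int) := by
      rcases Nat.eq_zero_or_pos S2 with h0 | h0
      · rw [if_pos (by exact_mod_cast h0), hF, pvFoldN_closed, if_pos h0]
        norm_num
      · rw [if_neg (by exact_mod_cast Nat.pos_iff_ne_zero.mp h0)]
        have h1 : ((S2 : Nat) : Int) - 1 = ((S2 - 1 : Nat) : Int) := by omega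
        rw [h1]
        have h2 : PySem.Int.mod ((S2 - 1 : Nat) : Int) 65535 = (((S2 - 1) % 65535 : Nat) : Int) := by
          exact_mod_cast PySem.Int.mod_natCast (S2 - 1) 65535
        rw [h2, hF, pvFoldN_closed, if_neg (by omega)]
        push_cast
        ring
    rw [hfold]
  rw [hAval, hBval]
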